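-- pv_equiv track=rewrite | github.com/Kriegbaum/Dynamo | Tantallion.py | rekt
-- ===== SOURCE A (Python) =====
-- def rekt(n):
--     #Function delivers the two closest divisible integers of input (n)
--     '''as in: get rekt skrub'''
--     factors = []
--     #Create a list of integer factors of (n)
--     for i in range(1, n + 1):
--         if n % i == 0:
--             factors.append(i)
--     #Grab middle or just on the large side of middle item for list
--     if len(factors) % 2 == 0:
--         larger = factors[int((len(factors) / 2))]
--     else:
--         larger = factors[int((len(factors) / 2) - .5)]
--     return [larger, int(n / larger)]
-- ===== SOURCE B (Python) =====
-- def rekt(n):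
--     #Function delivers the two closest divisible integers of input (n)
--     '''as in: get rekt skrub'''
--     # Largest divisor d of n with d*d <= n; the closest pair is then (n//d, d).
--     d = 1
--     i = 1
--     while i * i <= n:
--         if n % i == 0:
--             d = i
--         i += 1
--     return [n // d, d]
-- ===== Notes on version B (the rewrite author's own statement) =====
-- stated objective: faster
-- what changed: B replaces A's full 1..n divisor scan plus middle-of-list indexing by a single loop over i with i*i <= n that keeps the largest divisor d below sqrt(n) and returns [n//d, d].
-- outside the precondition, e.g. on rekt(0): A raises IndexError, B returns [0, 1]
import Mathlib
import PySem

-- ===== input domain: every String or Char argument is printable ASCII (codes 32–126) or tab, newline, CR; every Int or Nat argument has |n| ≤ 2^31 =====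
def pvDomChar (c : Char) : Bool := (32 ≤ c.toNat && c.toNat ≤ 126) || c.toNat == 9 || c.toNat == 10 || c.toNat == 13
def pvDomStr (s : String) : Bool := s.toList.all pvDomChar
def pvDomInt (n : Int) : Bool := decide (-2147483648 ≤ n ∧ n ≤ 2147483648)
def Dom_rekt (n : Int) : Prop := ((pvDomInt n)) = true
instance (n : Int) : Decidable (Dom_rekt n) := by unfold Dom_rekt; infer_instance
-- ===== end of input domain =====

-- B replaces A's full 1..n divisor scan by a loop up to sqrt(n) that keeps the largest
-- divisor d with d*d ≤ n and returns [n//d, d]: an asymptotically faster algorithm.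

-- ===== PORT A =====
def rekt (n : Int) : List Int :=
  let factors : List Int :=
    (PySem.List.pyRange 1 (n + 1) 1).foldl
      (fun acc i => if PySem.Int.mod n i == 0 then acc ++ [i] else acc) []
  let idx : Int :=
    if PySem.Int.mod (factors.length : Int) 2 == 0 then
      -- int(len(factors) / 2): exact, the float quotient of len ≤ n ≤ 2^31 is exact
      PySem.Int.floordiv (factors.length : Int) 2
    else
      -- int(len(factors) / 2 - .5) = (len - 1) / 2 exactly for odd len
      PySem.Int.floordiv ((factors.length : Int) - 1) 2
  match PySem.List.pyGet? factors idx with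
  | some larger => [larger, PySem.Int.floordiv n larger]  -- int(n / larger): exact, larger ∣ n
  | none => []                                            -- Python raises IndexError here (n ≤ 0)

-- ===== PORT B =====
-- the while loop of Source B; the fuel argument only makes the recursion structural:
-- the body runs while i*i ≤ n, hence at most n times, and fuel 1 + n.toNat never runs out
def rektAltLoop (n : Int) (fuel : Nat) (i d : Int) : Int :=
  match fuel with
  | 0 => d
  | fuel + 1 =>
    if i * i ≤ n then
      rektAltLoop n fuel (i + 1) (if PySem.Int.mod n i == 0 then i else d)
    else d


def rekt_alt (n : Int) : List Int :=
  let d := rektAltLoop n (1 + n.toNat) 1 1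
  [PySem.Int.floordiv n d, d]

-- ===== PRECONDITION & SPEC =====
-- Pre_ excludes exactly n ≤ 0, where A's factor list is empty and factors[idx] raises IndexError
def Pre_rekt (n : Int) : Prop := 1 ≤ n
instance (n : Int) : Decidable (Pre_rekt n) := by unfold Pre_rekt; infer_instance
def pvWitness_rekt : Int := (12)

def Spec_rekt (n : Int) (out : List Int) : Prop := out = rekt_alt n
instance (n : Int) (out : List Int) : Decidable (Spec_rekt n out) := by unfold Spec_rekt; infer_instance

-- ===== CLAIM (what is proved, stated in full; the proofs are below) =====
def Claim_equal_rekt : Prop := ∀ (n : Int), Dom_rekt n → Pre_rekt n → Spec_rekt n (rekt n)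

-- ===== LEMMAS AND PROOFS =====

def divL (n : Int) : List Int :=
  (PySem.List.pyRange 1 (n + 1) 1).filter (fun i => PySem.Int.mod n i == 0)
def isq (n : Int) : Int := (Nat.sqrt n.toNat : Int)

lemma pairwise_divL (n : Int) : (divL n).Pairwise (· < ·) :=
  List.Pairwise.sublist List.filter_sublist (PySem.List.pairwise_lt_pyRange_one 1 (n + 1))

lemma le_isq_iff {n x : Int} (hn : 0 ≤ n) (hx : 0 ≤ x) : x ≤ isq n ↔ x * x ≤ n := by
  have hx' : ((x.toNat : Int)) = x := Int.toNat_of_nonneg hx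
  have hn' : ((n.toNat : Int)) = n := Int.toNat_of_nonneg hn
  unfold isq
  rw [← hx', Nat.cast_le (α := Int), Nat.le_sqrt]
  rw [← hx', ← hn']
  exact_mod_cast Iff.rfl

lemma isq_nonneg (n : Int) : 0 ≤ isq n := by unfold isq; positivity

lemma isq_le {n : Int} (hn : 0 ≤ n) : isq n ≤ n := by
  by_cases h : isq n ≤ 0
  · omega
  · have := (le_isq_iff hn (by omega)).mp (le_refl (isq n))
    nlinarith

lemma mem_divL {n x : Int} : x ∈ divL n ↔ (1 ≤ x ∧ x ≤ n ∧ x ∣ n) := by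
  simp [divL, PySem.List.mem_pyRange_one, PySem.Int.mod_eq_zero_iff_dvd]
  constructor
  · rintro ⟨⟨h1, h2⟩, h3⟩; exact ⟨h1, by omega, h3⟩
  · rintro ⟨h1, h2, h3⟩; exact ⟨⟨h1, by omega⟩, h3⟩

lemma div_mem_divL {n x : Int} (hn : 1 ≤ n) (hx : x ∈ divL n) : n / x ∈ divL n := by
  rw [mem_divL] at *
  obtain ⟨h1, h2, hd⟩ := hx
  have hmul : n / x * x = n := Int.ediv_mul_cancel hd
  refine ⟨by nlinarith, by nlinarith, ⟨x, hmul.symm⟩⟩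

lemma ndiv_div_cancel {n x : Int} (hn : 1 ≤ n) (hx : x ∈ divL n) : n / (n / x) = x := by
  rw [mem_divL] at hx
  obtain ⟨h1, h2, hd⟩ := hx
  have hmul : n / x * x = n := Int.ediv_mul_cancel hd
  have h3 : 1 ≤ n / x := by nlinarith
  calc n / (n / x) = (n / x * x) / (n / x) := by rw [hmul]
    _ = x := by rw [mul_comm, Int.mul_ediv_cancel _ (by omega)]

lemma div_antitone {n x y : Int} (hx : x ∈ divL n) (hy : y ∈ divL n)
    (hxy : x < y) : n / y < n / x := by
  rw [mem_divL] at hx hy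
  obtain ⟨hx1, hx2, hxd⟩ := hx
  obtain ⟨hy1, hy2, hyd⟩ := hy
  have ex : n / x * x = n := Int.ediv_mul_cancel hxd
  have ey : n / y * y = n := Int.ediv_mul_cancel hyd
  by_contra h
  rw [not_lt] at h
  have h1 : 1 ≤ n / y := by nlinarith
  nlinarith

lemma map_div_divL {n : Int} (hn : 1 ≤ n) :
    (divL n).map (fun x => n / x) = (divL n).reverse := by
  have hpw : ((divL n).map (fun x => n / x)).Pairwise (· > ·) := by
    rw [List.pairwise_map]
    exact (pairwise_divL n).imp_of_mem (fun ha hb h => div_antitone ha hb h)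
  have hpw' : ((divL n).reverse).Pairwise (· > ·) := by
    rw [List.pairwise_reverse]
    exact (pairwise_divL n).imp (fun h => h)
  refine List.Perm.eq_of_pairwise (fun a b _ _ h1 h2 => le_antisymm (le_of_lt h2) (le_of_lt h1)) hpw hpw' ?_
  refine List.perm_of_nodup_nodup_toFinset_eq ?_ ?_ ?_
  · exact hpw.imp (fun h => ne_of_gt h)
  · exact hpw'.imp (fun h => ne_of_gt h)
  · ext x
    simp only [List.mem_toFinset, List.mem_reverse, List.mem_map]
    constructor
    · rintro ⟨y, hy, rfl⟩; exact div_mem_divL hn hy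
    · intro hx; exact ⟨n / x, div_mem_divL hn hx, ndiv_div_cancel hn hx⟩

lemma divL_pos {n : Int} {k : Nat} (hk : k < (divL n).length) : 1 ≤ (divL n)[k] :=
  (mem_divL.mp (List.getElem_mem hk)).1

lemma divL_dvd {n : Int} {k : Nat} (hk : k < (divL n).length) : (divL n)[k] ∣ n :=
  (mem_divL.mp (List.getElem_mem hk)).2.2

lemma divL_mono {n : Int} {i j : Nat} (hj : j < (divL n).length) (hij : i < j) :
    (divL n)[i]'(by omega) < (divL n)[j] :=
  List.pairwise_iff_getElem.mp (pairwise_divL n) i j (by omega) hj hij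

lemma divL_pair {n : Int} (hn : 1 ≤ n) {k : Nat} (hk : k < (divL n).length) :
    (divL n)[(divL n).length - 1 - k]'(by omega) = n / (divL n)[k] := by
  have h1 : ((divL n).map (fun x => n / x))[k]? = ((divL n).reverse)[k]? := by
    rw [map_div_divL hn]
  rw [List.getElem?_map, List.getElem?_reverse (by omega)] at h1
  rw [List.getElem?_eq_getElem hk, List.getElem?_eq_getElem (show (divL n).length - 1 - k < (divL n).length by omega)] at h1
  simp at h1
  omega

lemma divL_mul_pair {n : Int} (hn : 1 ≤ n) {k : Nat} (hk : k < (divL n).length) :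
    (divL n)[k] * ((divL n)[(divL n).length - 1 - k]'(by omega)) = n := by
  rw [divL_pair hn hk, mul_comm]
  exact Int.ediv_mul_cancel (divL_dvd hk)

-- the k-th divisor is ≤ isqrt(n) exactly when k is in the lower half of the list
lemma divL_le_isq_iff {n : Int} (hn : 1 ≤ n) {k : Nat} (hk : k < (divL n).length) :
    (divL n)[k] ≤ isq n ↔ 2 * k + 1 ≤ (divL n).length := by
  set m := (divL n).length with hm
  have hk' : m - 1 - k < m := by omega
  have hpair := divL_mul_pair hn hk
  have hpos := divL_pos hk
  have hpos' := divL_pos hk'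
  rw [le_isq_iff (by omega) (by omega)]
  constructor
  · intro h
    have hle : (divL n)[k] ≤ (divL n)[m - 1 - k]'hk' := by nlinarith
    by_contra hcon
    have : m - 1 - k < k := by omega
    have := divL_mono (n := n) hk this
    omega
  · intro h
    have hle : (divL n)[k] ≤ (divL n)[m - 1 - k]'hk' := by
      rcases Nat.lt_or_ge k (m - 1 - k) with hlt | hge
      · exact le_of_lt (divL_mono hk' hlt)
      · have : k = m - 1 - k := by omega
        simp [← this]
    nlinarith

lemma foldl_last {α : Type} (l : List α) (d : α) :
    l.foldl (fun _ j => j) d = l.getLastD d := by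
  induction l generalizing d with
  | nil => rfl
  | cons x t ih => rw [List.foldl_cons, ih, List.getLastD_cons]

lemma loop_run {n : Int} (hn : 1 ≤ n) :
    ∀ (fuel : Nat) (i d : Int), 1 ≤ i → (isq n + 1 - i).toNat ≤ fuel →
    rektAltLoop n fuel i d =
      ((PySem.List.pyRange i (isq n + 1) 1).filter (fun j => PySem.Int.mod n j == 0)).foldl
        (fun _ j => j) d := by
  intro fuel
  induction fuel with
  | zero =>
    intro i d hi hf
    rw [PySem.List.pyRange_one_eq_nil (by omega)]
    rfl
  | succ fuel ih =>
    intro i d hi hf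
    by_cases hc : i * i ≤ n
    · have his : i ≤ isq n := (le_isq_iff (by omega) (by omega)).mpr hc
      rw [rektAltLoop, if_pos hc, PySem.List.pyRange_one_cons (by omega), List.filter_cons]
      rw [ih (i + 1) _ (by omega) (by omega)]
      by_cases hd : PySem.Int.mod n i == 0
      · simp [hd]
      · simp [hd]
    · have his : ¬ (i ≤ isq n) := fun h => hc ((le_isq_iff (by omega) (by omega)).mp h)
      rw [rektAltLoop, if_neg hc, PySem.List.pyRange_one_eq_nil (by omega)]
      rfl

lemma range_filter_le_isq {n : Int} (hn : 1 ≤ n) :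
    (PySem.List.pyRange 1 (isq n + 1) 1).filter (fun j => PySem.Int.mod n j == 0) =
      (divL n).filter (fun x => decide (x ≤ isq n)) := by
  have h0 := isq_nonneg n
  have h1 := isq_le (show (0:Int) ≤ n by omega)
  rw [divL, List.filter_comm]
  congr 1
  rw [PySem.List.pyRange_one_append 1 (isq n + 1) (n + 1) (by omega) (by omega), List.filter_append]
  rw [List.filter_eq_self.mpr, List.filter_eq_nil_iff.mpr, List.append_nil]
  · intro a ha
    rw [PySem.List.mem_pyRange_one] at ha
    simp; omega
  · intro a ha
    rw [PySem.List.mem_pyRange_one] at ha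
    simp; omega

lemma one_mem_divL {n : Int} (hn : 1 ≤ n) : (1:Int) ∈ divL n :=
  mem_divL.mpr ⟨le_refl 1, hn, one_dvd n⟩

lemma divL_length_pos {n : Int} (hn : 1 ≤ n) : 1 ≤ (divL n).length :=
  List.length_pos_of_mem (one_mem_divL hn)

lemma filter_le_isq_eq_take {n : Int} (hn : 1 ≤ n) :
    (divL n).filter (fun x => decide (x ≤ isq n)) =
      (divL n).take (((divL n).length + 1) / 2) := by
  set m := (divL n).length with hm
  set t := (m + 1) / 2 with ht
  have hm1 : 1 ≤ m := divL_length_pos hn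
  conv_lhs => rw [← List.take_append_drop t (divL n)]
  rw [List.filter_append, List.filter_eq_self.mpr, List.filter_eq_nil_iff.mpr, List.append_nil]
  · intro a ha
    obtain ⟨j, hj, rfl⟩ := List.mem_iff_getElem.mp ha
    rw [List.getElem_drop]
    have hlen : t + j < m := by
      have := hj; simp [List.length_drop] at this; omega
    simp only [decide_eq_true_eq]
    intro hcon
    have := (divL_le_isq_iff hn hlen).mp hcon
    omega
  · intro a ha
    obtain ⟨k, hk, rfl⟩ := List.mem_iff_getElem.mp ha
    rw [List.getElem_take]
    have hkt : k < t := by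
      have := hk; simp [List.length_take] at this; omega
    have hkm : k < m := by omega
    simp only [decide_eq_true_eq]
    exact (divL_le_isq_iff hn hkm).mpr (by omega)

lemma getLastD_take {n : Int} (hn : 1 ≤ n) :
    ((divL n).take (((divL n).length + 1) / 2)).getLastD 1 =
      (divL n)[((divL n).length - 1) / 2]'(by have := divL_length_pos hn; omega) := by
  set m := (divL n).length with hm
  set t := (m + 1) / 2 with ht
  have hm1 : 1 ≤ m := divL_length_pos hn
  have htm : t ≤ m := by omega
  have hlen : ((divL n).take t).length = t := by simp [List.length_take]; omega
  rw [List.getLastD_eq_getLast?, List.getLast?_eq_getElem?, hlen]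
  rw [List.getElem?_eq_getElem (by omega : t - 1 < ((divL n).take t).length)]
  rw [Option.getD_some]
  rw [List.getElem_take]
  congr 1
  omega

theorem rekt_eq {n : Int} (hn : 1 ≤ n) : rekt n = rekt_alt n := by
  have hm1 : 1 ≤ (divL n).length := divL_length_pos hn
  have hk0m : ((divL n).length - 1) / 2 < (divL n).length := by omega
  have hmid : (divL n).length / 2 < (divL n).length := by omega
  have hfuel : (isq n + 1 - 1).toNat ≤ 1 + n.toNat := by
    have := isq_le (show (0:Int) ≤ n by omega); have := isq_nonneg n; omega
  -- B's loop finds the largest divisor ≤ isqrt(n): entry (len-1)/2 of the divisor list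
  have hd : rektAltLoop n (1 + n.toNat) 1 1 = (divL n)[((divL n).length - 1) / 2]'hk0m := by
    rw [loop_run hn (1 + n.toNat) 1 1 (le_refl 1) hfuel, range_filter_le_isq hn,
        foldl_last, filter_le_isq_eq_take hn, getLastD_take hn]
  -- A's factors list is divL n
  have hfac : (PySem.List.pyRange 1 (n + 1) 1).foldl
      (fun acc i => if PySem.Int.mod n i == 0 then acc ++ [i] else acc) [] = divL n := by
    rw [PySem.List.foldl_append_if_eq_filter]; rfl
  -- A's index is len / 2 in both parity branches
  have hidx : (if PySem.Int.mod ((divL n).length : Int) 2 == 0 then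
      PySem.Int.floordiv ((divL n).length : Int) 2
      else PySem.Int.floordiv (((divL n).length : Int) - 1) 2)
      = (((divL n).length / 2 : Nat) : Int) := by
    rw [PySem.Int.mod_eq_emod_of_pos (by norm_num),
        PySem.Int.floordiv_eq_ediv_of_pos (by norm_num),
        PySem.Int.floordiv_eq_ediv_of_pos (by norm_num)]
    by_cases hpar : ((divL n).length : Int) % 2 = 0
    · simp only [hpar, beq_self_eq_true, if_true]; omega
    · rw [if_neg (by simpa using hpar)]; omega
  -- the middle entry pairs with the (len-1)/2 entry
  have hpair : (divL n)[(divL n).length / 2]'hmid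
      = n / (divL n)[((divL n).length - 1) / 2]'hk0m := by
    have h := divL_pair hn hk0m
    have e : (divL n).length / 2 = (divL n).length - 1 - ((divL n).length - 1) / 2 := by omega
    exact Eq.trans (getElem_congr rfl e (by omega)) h
  have hpos0 : 1 ≤ (divL n)[((divL n).length - 1) / 2]'hk0m := divL_pos hk0m
  have hposm : 1 ≤ (divL n)[(divL n).length / 2]'hmid := divL_pos hmid
  simp only [rekt, rekt_alt]
  rw [hfac, hd, hidx, PySem.List.pyGet?_natCast, List.getElem?_eq_getElem hmid]
  simp only
  rw [PySem.Int.floordiv_eq_ediv_of_pos (by omega),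
      PySem.Int.floordiv_eq_ediv_of_pos (by omega)]
  rw [hpair, ndiv_div_cancel hn (List.getElem_mem hk0m)]

-- ===== VERDICT (by name: the statement is the Claim_ definition above) =====
theorem rekt_spec : Claim_equal_rekt := by
  intro n _ hpre
  unfold Spec_rekt
  exact rekt_eq hpre
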